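-- pv_equiv track=rewrite | github.com/GundalaNikhil/DSA | dsa-problems/Queues/solutions/python/QUE-002-circular-shuttle-buffer-overwrite.py | process_operations
-- ===== SOURCE A (Python) =====
-- from typing import List
--
-- def process_operations(k: int, operations: List[List[str]]) -> List[str]:
--     buffer = [0] * k
--     head = 0
--     tail = 0
--     count = 0
--     result = []
--
--     for op_data in operations:
--         cmd = op_data[0]
--
--         if cmd == "ENQ":
--             if count == k:
--                 result.append("false")
--             else:
--                 buffer[tail] = int(op_data[1])
--                 tail = (tail + 1) % k
--                 count += 1
--                 result.append("true")
--
--         elif cmd == "ENQ_OVR":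
--             val = int(op_data[1])
--             if count == k:
--                 # Overwrite and return the overwritten value
--                 overwritten = buffer[head]
--                 buffer[head] = val
--                 head = (head + 1) % k
--                 tail = (tail + 1) % k
--                 result.append(str(overwritten))
--             else:
--                 # Just add
--                 buffer[tail] = val
--                 tail = (tail + 1) % k
--                 count += 1
--                 result.append("NONE")
--
--         elif cmd == "DEQ":
--             if count == 0:
--                 result.append("EMPTY")
--             else:
--                 result.append(str(buffer[head]))
--                 head = (head + 1) % k
--                 count -= 1
--
--         elif cmd == "FRONT":
--             if count == 0:
--                 result.append("EMPTY")
--             else: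
--                 result.append(str(buffer[head]))
--
--         elif cmd == "REAR":
--             if count == 0:
--                 result.append("EMPTY")
--             else:
--                 idx = (tail - 1 + k) % k
--                 result.append(str(buffer[idx]))
--
--         elif cmd == "ISEMPTY":
--             result.append("true" if count == 0 else "false")
--
--         elif cmd == "ISFULL":
--             result.append("true" if count == k else "false")
--
--         elif cmd == "SIZE":
--             result.append(str(count))
--
--         else:
--             result.append("NONE")
--
--     return result
-- ===== SOURCE B (Python) =====
-- def process_operations(k, operations):
--     # queue kept as two stacks: the live contents are reversed(front) + back
--     front = []
--     back = []
--     result = []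
--
--     def size():
--         return len(front) + len(back)
--
--     def pop_head():
--         nonlocal front, back
--         if not front:
--             front = back[::-1]
--             back = []
--         return front.pop()
--
--     for op in operations:
--         cmd = op[0]
--         if cmd == "ENQ":
--             if size() == k:
--                 result.append("false")
--             else:
--                 back.append(int(op[1]))
--                 result.append("true")
--         elif cmd == "ENQ_OVR":
--             val = int(op[1])
--             if size() == k:
--                 overwritten = pop_head()
--                 back.append(val)
--                 result.append(str(overwritten))
--             else:
--                 back.append(val)
--                 result.append("NONE")
--         elif cmd == "DEQ":
--             result.append("EMPTY" if size() == 0 else str(pop_head()))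
--         elif cmd == "FRONT":
--             if size() == 0:
--                 result.append("EMPTY")
--             else:
--                 result.append(str(front[-1] if front else back[0]))
--         elif cmd == "REAR":
--             if size() == 0:
--                 result.append("EMPTY")
--             else:
--                 result.append(str(back[-1] if back else front[0]))
--         elif cmd == "ISEMPTY":
--             result.append("true" if size() == 0 else "false")
--         elif cmd == "ISFULL":
--             result.append("true" if size() == k else "false")
--         elif cmd == "SIZE":
--             result.append(str(size()))
--         else:
--             result.append("NONE")
--     return result
-- ===== Notes on version B (the rewrite author's own statement) =====
-- stated objective: alternative
-- what changed: Replaces the fixed preallocated circular buffer with head/tail/count modular index arithmetic by a two-stack (Okasaki-style) queue: enqueues push onto a back stack, dequeues pop the front stack and lazily reverse the back stack into it when it empties, so no modular arithmetic or preallocation remains and the data is traversed via stack rotations instead of wraparound indexing.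
-- outside the precondition, e.g. on process_operations(1, [['ENQ', '1'], ['ENQ', 'x']]): A returns ['true', 'false'], B returns ['true', 'false']
import Mathlib
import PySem

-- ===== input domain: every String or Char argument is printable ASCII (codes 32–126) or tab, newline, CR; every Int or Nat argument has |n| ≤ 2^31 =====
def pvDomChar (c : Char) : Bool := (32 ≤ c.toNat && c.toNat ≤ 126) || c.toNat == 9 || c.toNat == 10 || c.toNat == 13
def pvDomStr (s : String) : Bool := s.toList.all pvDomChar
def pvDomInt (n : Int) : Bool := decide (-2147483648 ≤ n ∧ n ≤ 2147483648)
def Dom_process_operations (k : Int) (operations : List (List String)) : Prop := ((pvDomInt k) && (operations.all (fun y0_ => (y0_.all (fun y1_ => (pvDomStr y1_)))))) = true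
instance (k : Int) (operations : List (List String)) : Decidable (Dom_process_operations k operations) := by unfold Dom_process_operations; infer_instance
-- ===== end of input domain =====

-- B replaces A's fixed circular buffer with head/tail/count modular arithmetic by a two-stack
-- queue (push on a back stack, pop from a front stack refilled by reversing the back stack).


-- ===== PORT A =====
-- one loop iteration of A; state = (buffer, head, tail, count, result)
-- buffer[tail] = v is ported as buffer.set tail.toNat v and buffer[head] as pyGet?+getD 0:
-- exact whenever the index is in range, which Pre_ guarantees (outside Pre_ Python raises).
def pvStepA (k : Int) (st : List Int × Int × Int × Int × List String) (op : List String) :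
    List Int × Int × Int × Int × List String :=
  let buffer := st.1
  let head := st.2.1
  let tail := st.2.2.1
  let count := st.2.2.2.1
  let result := st.2.2.2.2
  let cmd := (PySem.List.pyGet? op 0).getD ""
  if cmd = "ENQ" then
    if count = k then (buffer, head, tail, count, result ++ ["false"])
    else
      let v := ((PySem.List.pyGet? op 1).bind PySem.Int.ofStr?).getD 0
      (buffer.set tail.toNat v, head, PySem.Int.mod (tail + 1) k, count + 1, result ++ ["true"])
  else if cmd = "ENQ_OVR" then
    let v := ((PySem.List.pyGet? op 1).bind PySem.Int.ofStr?).getD 0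
    if count = k then
      let overwritten := (PySem.List.pyGet? buffer head).getD 0
      (buffer.set head.toNat v, PySem.Int.mod (head + 1) k, PySem.Int.mod (tail + 1) k, count,
        result ++ [PySem.Int.toStr overwritten])
    else
      (buffer.set tail.toNat v, head, PySem.Int.mod (tail + 1) k, count + 1, result ++ ["NONE"])
  else if cmd = "DEQ" then
    if count = 0 then (buffer, head, tail, count, result ++ ["EMPTY"])
    else (buffer, PySem.Int.mod (head + 1) k, tail, count - 1,
      result ++ [PySem.Int.toStr ((PySem.List.pyGet? buffer head).getD 0)])
  else if cmd = "FRONT" then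
    if count = 0 then (buffer, head, tail, count, result ++ ["EMPTY"])
    else (buffer, head, tail, count, result ++ [PySem.Int.toStr ((PySem.List.pyGet? buffer head).getD 0)])
  else if cmd = "REAR" then
    if count = 0 then (buffer, head, tail, count, result ++ ["EMPTY"])
    else
      let idx := PySem.Int.mod (tail - 1 + k) k
      (buffer, head, tail, count, result ++ [PySem.Int.toStr ((PySem.List.pyGet? buffer idx).getD 0)])
  else if cmd = "ISEMPTY" then
    (buffer, head, tail, count, result ++ [if count = 0 then "true" else "false"])
  else if cmd = "ISFULL" then
    (buffer, head, tail, count, result ++ [if count = k then "true" else "false"])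
  else if cmd = "SIZE" then
    (buffer, head, tail, count, result ++ [PySem.Int.toStr count])
  else
    (buffer, head, tail, count, result ++ ["NONE"])

def process_operations (k : Int) (operations : List (List String)) : List String :=
  (operations.foldl (pvStepA k) (List.replicate k.toNat 0, 0, 0, 0, [])).2.2.2.2

-- ===== PORT B =====
-- B's queue is two stacks: live contents = front.reverse ++ back (tops at the list ends).
-- pop_head: if front is empty, refill it with back reversed; then front.pop() (Python's
-- default pop = last element = PySem.List.pop? with its default index -1; none = IndexError,
-- excluded by Pre_).
def pvPopHead (front back : List Int) : Option (Int × List Int × List Int) :=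
  let fb := if front = [] then (back.reverse, ([] : List Int)) else (front, back)
  match PySem.List.pop? fb.1 with
  | some (x, rest) => some (x, rest, fb.2)
  | none => none

def pvStepB (k : Int) (st : List Int × List Int × List String) (op : List String) :
    List Int × List Int × List String :=
  let front := st.1
  let back := st.2.1
  let result := st.2.2
  let size : Int := ((front.length + back.length : Nat) : Int)
  let cmd := (PySem.List.pyGet? op 0).getD ""
  if cmd = "ENQ" then
    if size = k then (front, back, result ++ ["false"])
    else
      let v := ((PySem.List.pyGet? op 1).bind PySem.Int.ofStr?).getD 0
      (front, back ++ [v], result ++ ["true"])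
  else if cmd = "ENQ_OVR" then
    let v := ((PySem.List.pyGet? op 1).bind PySem.Int.ofStr?).getD 0
    if size = k then
      match pvPopHead front back with
      | some (ov, f', b') => (f', b' ++ [v], result ++ [PySem.Int.toStr ov])
      | none => (front, back, result)   -- front.pop() raises IndexError here (outside Pre_)
    else (front, back ++ [v], result ++ ["NONE"])
  else if cmd = "DEQ" then
    if size = 0 then (front, back, result ++ ["EMPTY"])
    else
      match pvPopHead front back with
      | some (x, f', b') => (f', b', result ++ [PySem.Int.toStr x])
      | none => (front, back, result)   -- unreachable: size ≠ 0
  else if cmd = "FRONT" then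
    if size = 0 then (front, back, result ++ ["EMPTY"])
    else
      let x := if front ≠ [] then (PySem.List.pyGet? front (-1)).getD 0
               else (PySem.List.pyGet? back 0).getD 0
      (front, back, result ++ [PySem.Int.toStr x])
  else if cmd = "REAR" then
    if size = 0 then (front, back, result ++ ["EMPTY"])
    else
      let x := if back ≠ [] then (PySem.List.pyGet? back (-1)).getD 0
               else (PySem.List.pyGet? front 0).getD 0
      (front, back, result ++ [PySem.Int.toStr x])
  else if cmd = "ISEMPTY" then
    (front, back, result ++ [if size = 0 then "true" else "false"])
  else if cmd = "ISFULL" then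
    (front, back, result ++ [if size = k then "true" else "false"])
  else if cmd = "SIZE" then
    (front, back, result ++ [PySem.Int.toStr size])
  else
    (front, back, result ++ ["NONE"])

def process_operations_alt (k : Int) (operations : List (List String)) : List String :=
  (operations.foldl (pvStepB k) ([], [], [])).2.2

-- ===== PRECONDITION & SPEC =====
-- Pre_ excludes the inputs where A raises: an empty operation (IndexError); an ENQ_OVR unless
-- 0 < k with a well-formed int operand (IndexError/ValueError); an ENQ without a well-formed int
-- operand when k ≠ 0 (ValueError/IndexError); and an ENQ/ENQ_OVR with k < 0 (IndexError on the
-- empty buffer).  It is slightly conservative: requiring the ENQ operand to parse up front also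
-- drops inputs where A returns because the buffer happens to be full at that ENQ, so the parse
-- is skipped — see the cite in claim.json.
def PreOp_process_operations (k : Int) (op : List String) : Prop :=
  op ≠ [] ∧
  (op.head?.getD "" = "ENQ" ∧ k ≠ 0 →
      2 ≤ op.length ∧ ((PySem.List.pyGet? op 1).bind PySem.Int.ofStr?).isSome = true) ∧
  (op.head?.getD "" = "ENQ_OVR" →
      0 < k ∧ 2 ≤ op.length ∧ ((PySem.List.pyGet? op 1).bind PySem.Int.ofStr?).isSome = true)

def Pre_process_operations (k : Int) (operations : List (List String)) : Prop :=
  (∀ op ∈ operations, PreOp_process_operations k op) ∧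
  (0 ≤ k ∨ ∀ op ∈ operations, op.head?.getD "" ≠ "ENQ" ∧ op.head?.getD "" ≠ "ENQ_OVR")

instance (k : Int) (operations : List (List String)) : Decidable (Pre_process_operations k operations) := by
  unfold Pre_process_operations PreOp_process_operations; infer_instance

def pvWitness_process_operations : Int × List (List String) :=
  (2, [["ENQ", "1"], ["ENQ", "2"], ["ENQ", "3"], ["ENQ_OVR", "4"], ["DEQ"], ["FRONT"], ["REAR"],
       ["ISEMPTY"], ["ISFULL"], ["SIZE"], ["NOP"]])

def Spec_process_operations (k : Int) (operations : List (List String)) (out : List String) : Prop := out = process_operations_alt k operations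
instance (k : Int) (operations : List (List String)) (out : List String) : Decidable (Spec_process_operations k operations out) := by unfold Spec_process_operations; infer_instance

-- ===== CLAIM (what is proved, stated in full; the proofs are below) =====
def Claim_equal_process_operations : Prop := ∀ (k : Int) (operations : List (List String)), Dom_process_operations k operations → Pre_process_operations k operations → Spec_process_operations k operations (process_operations k operations)

-- ===== LEMMAS AND PROOFS =====

-- proof-layer abstraction of B's two-stack queue: one step over the abstract live queue q
-- (A is related to pvStepQ by the circular-buffer invariant, pvStepQ to pvStepB by
-- q = front.reverse ++ back).
def pvStepQ (k : Int) (st : List Int × List String) (op : List String) :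
    List Int × List String :=
  let q := st.1
  let result := st.2
  let cmd := (PySem.List.pyGet? op 0).getD ""
  if cmd = "ENQ" then
    if (q.length : Int) = k then (q, result ++ ["false"])
    else
      let v := ((PySem.List.pyGet? op 1).bind PySem.Int.ofStr?).getD 0
      (q ++ [v], result ++ ["true"])
  else if cmd = "ENQ_OVR" then
    let v := ((PySem.List.pyGet? op 1).bind PySem.Int.ofStr?).getD 0
    if (q.length : Int) = k then
      match PySem.List.pop? q 0 with
      | some (overwritten, rest) => (rest ++ [v], result ++ [PySem.Int.toStr overwritten])
      | none => (q, result)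
    else (q ++ [v], result ++ ["NONE"])
  else if cmd = "DEQ" then
    if q = [] then (q, result ++ ["EMPTY"])
    else
      match PySem.List.pop? q 0 with
      | some (x, rest) => (rest, result ++ [PySem.Int.toStr x])
      | none => (q, result)
  else if cmd = "FRONT" then
    if q = [] then (q, result ++ ["EMPTY"])
    else (q, result ++ [PySem.Int.toStr ((PySem.List.pyGet? q 0).getD 0)])
  else if cmd = "REAR" then
    if q = [] then (q, result ++ ["EMPTY"])
    else (q, result ++ [PySem.Int.toStr ((PySem.List.pyGet? q (-1)).getD 0)])
  else if cmd = "ISEMPTY" then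
    (q, result ++ [if q = [] then "true" else "false"])
  else if cmd = "ISFULL" then
    (q, result ++ [if (q.length : Int) = k then "true" else "false"])
  else if cmd = "SIZE" then
    (q, result ++ [PySem.Int.toStr (q.length : Int)])
  else
    (q, result ++ ["NONE"])

-- the coupling invariant between A's circular-buffer state and the abstract live queue q
def pvInv (k : Int) (buffer : List Int) (head tail count : Int) (q : List Int) : Prop :=
  buffer.length = k.toNat ∧ 0 ≤ head ∧ 0 ≤ tail ∧
  head.toNat < max k.toNat 1 ∧
  count = (q.length : Int) ∧ q.length ≤ k.toNat ∧
  tail.toNat = (head.toNat + q.length) % max k.toNat 1 ∧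
  ∀ i : Nat, i < q.length → buffer.getD ((head.toNat + i) % k.toNat) 0 = q.getD i 0

lemma pv_mod_shift_ne (kn h i j : Nat) (hk : 0 < kn) (hij : i < j) (hj : j - i < kn) :
    (h + i) % kn ≠ (h + j) % kn := by
  intro hEq
  have hdvd : kn ∣ (h + j) - (h + i) := (Nat.modEq_iff_dvd' (by omega)).1 hEq
  have : kn ≤ (h + j) - (h + i) := Nat.le_of_dvd (by omega) hdvd
  omega

lemma pv_getD_set (l : List Int) (j i : Nat) (v : Int) (hj : j < l.length) :
    (l.set j v).getD i 0 = if i = j then v else l.getD i 0 := by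
  by_cases h : i = j
  · subst h; simp [List.getD_eq_getElem?_getD, List.getElem?_set_self hj]
  · simp [h, List.getD_eq_getElem?_getD, List.getElem?_set_ne (Ne.symm h)]

lemma pv_getD_snoc (l : List Int) (v : Int) (i : Nat) (hi : i ≤ l.length) :
    (l ++ [v]).getD i 0 = if i = l.length then v else l.getD i 0 := by
  by_cases h : i = l.length
  · subst h; simp [List.getD_eq_getElem?_getD]
  · have hlt : i < l.length := by omega
    simp [h, List.getD_eq_getElem?_getD, List.getElem?_append_left hlt]

lemma pv_mod_succ (t kn : Nat) : PySem.Int.mod ((t : Int) + 1) (kn : Int) = (((t + 1) % kn : Nat) : Int) := by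
  rw [show ((t : Int) + 1) = (((t + 1 : Nat)) : Int) by push_cast; ring]
  exact PySem.Int.mod_natCast _ _

lemma pv_mod_rear (t kn : Nat) (hkn : 0 < kn) :
    PySem.Int.mod ((t : Int) - 1 + (kn : Int)) (kn : Int) = (((t + kn - 1) % kn : Nat) : Int) := by
  rw [show ((t : Int) - 1 + (kn : Int)) = (((t + kn - 1 : Nat)) : Int) by omega]
  exact PySem.Int.mod_natCast _ _

lemma pvInv_natCast (kn h t : Nat) (c : Int) (buffer q : List Int)
    (h1 : buffer.length = kn) (h2 : h < max kn 1) (hc : c = (q.length : Int)) (h3 : q.length ≤ kn)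
    (h4 : t = (h + q.length) % max kn 1)
    (h5 : ∀ i < q.length, buffer.getD ((h + i) % kn) 0 = q.getD i 0) :
    pvInv (kn : Int) buffer (h : Int) (t : Int) c q := by
  refine ⟨by simpa using h1, by positivity, by positivity, by simpa using h2, hc,
    by simpa using h3, by simpa using h4, by simpa using h5⟩

lemma pv_step_sim (k : Int) (hk : 0 ≤ k) (buffer : List Int) (head tail count : Int)
    (q : List Int) (res : List String) (op : List String)
    (hop : PreOp_process_operations k op) (hinv : pvInv k buffer head tail count q) :
    ∃ buffer' head' tail' count' q' out,
      pvStepA k (buffer, head, tail, count, res) op = (buffer', head', tail', count', res ++ [out]) ∧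
      pvStepQ k (q, res) op = (q', res ++ [out]) ∧
      pvInv k buffer' head' tail' count' q' := by
  obtain ⟨hne, _, hovr⟩ := hop
  obtain ⟨kn, rfl⟩ : ∃ kn : Nat, k = (kn : Int) := ⟨k.toNat, (Int.toNat_of_nonneg hk).symm⟩
  obtain ⟨h, rfl⟩ : ∃ h : Nat, head = (h : Int) := ⟨head.toNat, (Int.toNat_of_nonneg hinv.2.1).symm⟩
  obtain ⟨t, rfl⟩ : ∃ t : Nat, tail = (t : Int) := ⟨tail.toNat, (Int.toNat_of_nonneg hinv.2.2.1).symm⟩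
  have hcq : count = (q.length : Int) := hinv.2.2.2.2.1
  subst hcq
  have hlen : buffer.length = kn := by simpa using hinv.1
  have hhlt : h < max kn 1 := by simpa using hinv.2.2.2.1
  have hqk : q.length ≤ kn := by simpa using hinv.2.2.2.2.2.1
  have htq : t = (h + q.length) % max kn 1 := by simpa using hinv.2.2.2.2.2.2.1
  have hpt : ∀ i < q.length, buffer.getD ((h + i) % kn) 0 = q.getD i 0 := by
    simpa using hinv.2.2.2.2.2.2.2
  have hcmd : (PySem.List.pyGet? op 0).getD "" = op.head?.getD "" := by
    cases op with
    | nil => exact absurd rfl hne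
    | cons a l => simp [PySem.List.pyGet?_zero_cons]
  by_cases hc1 : op.head?.getD "" = "ENQ"
  · -- ENQ
    by_cases hfull : (q.length : Int) = (kn : Int)
    · exact ⟨buffer, ↑h, ↑t, ↑q.length, q, "false",
        by simp [pvStepA, hcmd, hc1, hfull], by simp [pvStepQ, hcmd, hc1, hfull], hinv⟩
    · have hnk : q.length < kn := by omega
      have hkn : 0 < kn := by omega
      have hhk : h < kn := by omega
      have hmax : max kn 1 = kn := by omega
      rw [hmax] at htq
      have htk : t < kn := by rw [htq]; exact Nat.mod_lt _ hkn
      refine ⟨buffer.set t (((PySem.List.pyGet? op 1).bind PySem.Int.ofStr?).getD 0),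
        ↑h, PySem.Int.mod ((t : Int) + 1) (kn : Int), (q.length : Int) + 1,
        q ++ [((PySem.List.pyGet? op 1).bind PySem.Int.ofStr?).getD 0], "true",
        by simp [pvStepA, hcmd, hc1, hfull],
        by simp [pvStepQ, hcmd, hc1, hfull], ?_⟩
      rw [pv_mod_succ]
      refine pvInv_natCast kn h ((t + 1) % kn) _ _ _ (by simpa using hlen) (by omega)
        (by push_cast; simp) (by simp; omega) ?_ ?_
      · rw [hmax]
        simp only [List.length_append, List.length_cons, List.length_nil]
        rw [htq, Nat.mod_add_mod, Nat.add_assoc]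
      · intro i hi
        simp only [List.length_append, List.length_cons, List.length_nil] at hi
        rw [pv_getD_set _ _ _ _ (by omega), pv_getD_snoc _ _ _ (by omega)]
        by_cases hin : i = q.length
        · subst hin
          rw [if_pos rfl, if_pos (by rw [htq])]
        · have hilt : i < q.length := by omega
          rw [if_neg hin, if_neg (by rw [htq]; exact pv_mod_shift_ne _ _ _ _ hkn hilt (by omega))]
          exact hpt i hilt
  · by_cases hc2 : op.head?.getD "" = "ENQ_OVR"
    · -- ENQ_OVR
      have hkn : 0 < kn := by exact_mod_cast (hovr hc2).1
      have hhk : h < kn := by omega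
      have hmax : max kn 1 = kn := by omega
      rw [hmax] at htq
      by_cases hfull : (q.length : Int) = (kn : Int)
      · have hn : q.length = kn := by exact_mod_cast hfull
        cases q with
        | nil => simp at hn; omega
        | cons a rest =>
          have hrl : rest.length + 1 = kn := by simpa using hn
          have hfront : (buffer[h]?).getD 0 = a := by
            have h0 := hpt 0 (by simp)
            rw [Nat.add_zero, Nat.mod_eq_of_lt hhk] at h0
            rw [← List.getD_eq_getElem?_getD]
            simpa using h0
          have hth : t = h := by
            rw [htq, List.length_cons, hrl, Nat.add_mod_right, Nat.mod_eq_of_lt hhk]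
          have hfc : (rest.length : Int) + 1 = (kn : Int) := by exact_mod_cast hrl
          refine ⟨buffer.set h (((PySem.List.pyGet? op 1).bind PySem.Int.ofStr?).getD 0),
            PySem.Int.mod ((h : Int) + 1) (kn : Int), PySem.Int.mod ((t : Int) + 1) (kn : Int),
            (((a :: rest).length : Nat) : Int),
            rest ++ [((PySem.List.pyGet? op 1).bind PySem.Int.ofStr?).getD 0], PySem.Int.toStr a,
            by simp [pvStepA, hcmd, hc1, hc2, hfc, hfront],
            by simp [pvStepQ, hcmd, hc1, hc2, hfc, PySem.List.pop?_zero_cons], ?_⟩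
          rw [pv_mod_succ h kn, pv_mod_succ t kn]
          refine pvInv_natCast kn ((h + 1) % kn) ((t + 1) % kn) _ _ _ (by simpa using hlen)
            (by have := Nat.mod_lt (h + 1) hkn; omega) (by simp) (by simp; omega) ?_ ?_
          · rw [hmax, hth]
            simp only [List.length_append, List.length_cons, List.length_nil]
            rw [show rest.length + 1 = kn from hrl, Nat.add_mod_right,
              Nat.mod_mod_of_dvd _ dvd_rfl]
          · intro i hi
            simp only [List.length_append, List.length_cons, List.length_nil] at hi
            rw [pv_getD_set _ _ _ _ (by omega), pv_getD_snoc _ _ _ (by omega),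
              Nat.mod_add_mod, show h + 1 + i = h + (i + 1) from by omega]
            by_cases hin : i = rest.length
            · subst hin
              rw [if_pos (by rw [show rest.length + 1 = kn from hrl, Nat.add_mod_right,
                    Nat.mod_eq_of_lt hhk]), if_pos rfl]
            · have hilt : i < rest.length := by omega
              have hne2 : (h + (i + 1)) % kn ≠ h := by
                have hs := pv_mod_shift_ne kn h 0 (i + 1) hkn (by omega) (by omega)
                rw [Nat.add_zero, Nat.mod_eq_of_lt hhk] at hs
                exact Ne.symm hs
              rw [if_neg hne2, if_neg hin]
              have hp := hpt (i + 1) (by simp; omega)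
              rw [List.getD_cons_succ] at hp
              exact hp
      · -- ENQ_OVR, not full
        have hnk : q.length < kn := by omega
        have htk : t < kn := by rw [htq]; exact Nat.mod_lt _ hkn
        refine ⟨buffer.set t (((PySem.List.pyGet? op 1).bind PySem.Int.ofStr?).getD 0),
          ↑h, PySem.Int.mod ((t : Int) + 1) (kn : Int), (q.length : Int) + 1,
          q ++ [((PySem.List.pyGet? op 1).bind PySem.Int.ofStr?).getD 0], "NONE",
          by simp [pvStepA, hcmd, hc1, hc2, hfull],
          by simp [pvStepQ, hcmd, hc1, hc2, hfull], ?_⟩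
        rw [pv_mod_succ]
        refine pvInv_natCast kn h ((t + 1) % kn) _ _ _ (by simpa using hlen) (by omega)
          (by push_cast; simp) (by simp; omega) ?_ ?_
        · rw [hmax]
          simp only [List.length_append, List.length_cons, List.length_nil]
          rw [htq, Nat.mod_add_mod, Nat.add_assoc]
        · intro i hi
          simp only [List.length_append, List.length_cons, List.length_nil] at hi
          rw [pv_getD_set _ _ _ _ (by omega), pv_getD_snoc _ _ _ (by omega)]
          by_cases hin : i = q.length
          · subst hin
            rw [if_pos rfl, if_pos (by rw [htq])]
          · have hilt : i < q.length := by omega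
            rw [if_neg hin, if_neg (by rw [htq]; exact pv_mod_shift_ne _ _ _ _ hkn hilt (by omega))]
            exact hpt i hilt
    · by_cases hc3 : op.head?.getD "" = "DEQ"
      · -- DEQ
        cases q with
        | nil =>
          exact ⟨buffer, ↑h, ↑t, 0, [], "EMPTY",
            by simp [pvStepA, hcmd, hc1, hc2, hc3],
            by simp [pvStepQ, hcmd, hc1, hc2, hc3], by simpa using hinv⟩
        | cons a rest =>
          have hkn : 0 < kn := by simp [List.length_cons] at hqk; omega
          have hhk : h < kn := by omega
          have hmax : max kn 1 = kn := by omega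
          rw [hmax] at htq
          have hq0 : ¬((rest.length : Int) + 1 = 0) := by omega
          have hfront : (buffer[h]?).getD 0 = a := by
            have h0 := hpt 0 (by simp)
            rw [Nat.add_zero, Nat.mod_eq_of_lt hhk] at h0
            rw [← List.getD_eq_getElem?_getD]
            simpa using h0
          refine ⟨buffer, PySem.Int.mod ((h : Int) + 1) (kn : Int), ↑t,
            (((a :: rest).length : Nat) : Int) - 1, rest, PySem.Int.toStr a,
            by simp [pvStepA, hcmd, hc1, hc2, hc3, hq0, hfront],
            by simp [pvStepQ, hcmd, hc1, hc2, hc3, PySem.List.pop?_zero_cons], ?_⟩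
          rw [pv_mod_succ]
          refine pvInv_natCast kn ((h + 1) % kn) t _ _ _ hlen
            (by have := Nat.mod_lt (h + 1) hkn; omega) (by push_cast; simp)
            (by simp [List.length_cons] at hqk ⊢; omega) ?_ ?_
          · rw [hmax, Nat.mod_add_mod, htq,
              show h + (a :: rest).length = h + 1 + rest.length from by simp; omega]
          · intro i hi
            rw [Nat.mod_add_mod, show h + 1 + i = h + (i + 1) from by omega]
            have hp := hpt (i + 1) (by simp; omega)
            rw [List.getD_cons_succ] at hp
            exact hp
      · by_cases hc4 : op.head?.getD "" = "FRONT"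
        · -- FRONT
          cases q with
          | nil =>
            exact ⟨buffer, ↑h, ↑t, 0, [], "EMPTY",
              by simp [pvStepA, hcmd, hc1, hc2, hc3, hc4],
              by simp [pvStepQ, hcmd, hc1, hc2, hc3, hc4], by simpa using hinv⟩
          | cons a rest =>
            have hkn : 0 < kn := by simp [List.length_cons] at hqk; omega
            have hhk : h < kn := by omega
            have hfront : (buffer[h]?).getD 0 = a := by
              have h0 := hpt 0 (by simp)
              rw [Nat.add_zero, Nat.mod_eq_of_lt hhk] at h0
              rw [← List.getD_eq_getElem?_getD]
              simpa using h0
            have hq0 : ¬((rest.length : Int) + 1 = 0) := by omega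
            exact ⟨buffer, ↑h, ↑t, (((a :: rest).length : Nat) : Int), a :: rest, PySem.Int.toStr a,
              by simp [pvStepA, hcmd, hc1, hc2, hc3, hc4, hq0, hfront],
              by simp [pvStepQ, hcmd, hc1, hc2, hc3, hc4, PySem.List.pyGet?_zero_cons], hinv⟩
        · by_cases hc5 : op.head?.getD "" = "REAR"
          · -- REAR
            cases q with
            | nil =>
              exact ⟨buffer, ↑h, ↑t, 0, [], "EMPTY",
                by simp [pvStepA, hcmd, hc1, hc2, hc3, hc4, hc5],
                by simp [pvStepQ, hcmd, hc1, hc2, hc3, hc4, hc5], by simpa using hinv⟩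
            | cons a rest =>
              have hkn : 0 < kn := by simp [List.length_cons] at hqk; omega
              have hhk : h < kn := by omega
              have hmax : max kn 1 = kn := by omega
              rw [hmax] at htq
              have hidxr : (t + kn - 1) % kn = (h + rest.length) % kn := by
                rw [htq]
                calc ((h + (a :: rest).length) % kn + kn - 1) % kn
                    = ((h + (a :: rest).length) % kn + (kn - 1)) % kn := by congr 1; omega
                  _ = ((h + (a :: rest).length) + (kn - 1)) % kn := Nat.mod_add_mod _ _ _
                  _ = ((h + rest.length) + kn) % kn := by congr 1; simp; omega
                  _ = (h + rest.length) % kn := Nat.add_mod_right _ _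
              have hq0 : ¬((rest.length : Int) + 1 = 0) := by omega
              have hrll : rest.length < (a :: rest).length := by simp
              have hA2 : (PySem.List.pyGet? buffer (((t + kn - 1 : Nat) : Int) % ((kn : Nat) : Int))).getD 0
                  = (a :: rest)[rest.length] := by
                rw [show (((t + kn - 1 : Nat) : Int) % ((kn : Nat) : Int)) = ((((t + kn - 1) % kn : Nat)) : Int)
                      from (Int.natCast_mod _ _).symm,
                  PySem.List.pyGet?_natCast, ← List.getD_eq_getElem?_getD, hidxr,
                  hpt rest.length hrll, List.getD_eq_getElem?_getD, List.getElem?_eq_getElem hrll]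
                rfl
              have hrearB : ((a :: rest).getLast?).getD 0 = (a :: rest).getD rest.length 0 := by
                rw [List.getLast?_eq_getElem?, ← List.getD_eq_getElem?_getD]
                simp
              exact ⟨buffer, ↑h, ↑t, (((a :: rest).length : Nat) : Int), a :: rest,
                PySem.Int.toStr ((a :: rest).getD rest.length 0),
                by simp [pvStepA, hcmd, hc1, hc2, hc3, hc4, hc5, hq0, pv_mod_rear t kn hkn, hA2] <;> rfl,
                by simp [pvStepQ, hcmd, hc1, hc2, hc3, hc4, hc5, PySem.List.pyGet?_neg_one, hrearB],
                hinv⟩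
          · by_cases hc6 : op.head?.getD "" = "ISEMPTY"
            · -- ISEMPTY
              cases q with
              | nil =>
                exact ⟨buffer, ↑h, ↑t, 0, [], "true",
                  by simp [pvStepA, hcmd, hc1, hc2, hc3, hc4, hc5, hc6],
                  by simp [pvStepQ, hcmd, hc1, hc2, hc3, hc4, hc5, hc6], by simpa using hinv⟩
              | cons a rest =>
                have hq0 : ¬((rest.length : Int) + 1 = 0) := by omega
                exact ⟨buffer, ↑h, ↑t, (((a :: rest).length : Nat) : Int), a :: rest, "false",
                  by simp [pvStepA, hcmd, hc1, hc2, hc3, hc4, hc5, hc6, hq0],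
                  by simp [pvStepQ, hcmd, hc1, hc2, hc3, hc4, hc5, hc6], hinv⟩
            · by_cases hc7 : op.head?.getD "" = "ISFULL"
              · -- ISFULL
                exact ⟨buffer, ↑h, ↑t, (q.length : Int), q,
                  if (q.length : Int) = (kn : Int) then "true" else "false",
                  by simp [pvStepA, hcmd, hc1, hc2, hc3, hc4, hc5, hc6, hc7],
                  by simp [pvStepQ, hcmd, hc1, hc2, hc3, hc4, hc5, hc6, hc7], hinv⟩
              · by_cases hc8 : op.head?.getD "" = "SIZE"
                · -- SIZE
                  exact ⟨buffer, ↑h, ↑t, (q.length : Int), q, PySem.Int.toStr (q.length : Int),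
                    by simp [pvStepA, hcmd, hc1, hc2, hc3, hc4, hc5, hc6, hc7, hc8],
                    by simp [pvStepQ, hcmd, hc1, hc2, hc3, hc4, hc5, hc6, hc7, hc8], hinv⟩
                · -- unknown command
                  exact ⟨buffer, ↑h, ↑t, (q.length : Int), q, "NONE",
                    by simp [pvStepA, hcmd, hc1, hc2, hc3, hc4, hc5, hc6, hc7, hc8],
                    by simp [pvStepQ, hcmd, hc1, hc2, hc3, hc4, hc5, hc6, hc7, hc8], hinv⟩

lemma pv_step_query (k : Int) (buffer : List Int) (head tail : Int) (res : List String)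
    (op : List String) (hne : op ≠ []) (h1 : op.head?.getD "" ≠ "ENQ")
    (h2 : op.head?.getD "" ≠ "ENQ_OVR") :
    ∃ out, pvStepA k (buffer, head, tail, 0, res) op = (buffer, head, tail, 0, res ++ [out]) ∧
      pvStepQ k (([] : List Int), res) op = ([], res ++ [out]) := by
  have hcmd : (PySem.List.pyGet? op 0).getD "" = op.head?.getD "" := by
    cases op with
    | nil => exact absurd rfl hne
    | cons a l => simp
  by_cases hc3 : op.head?.getD "" = "DEQ"
  · exact ⟨"EMPTY", by simp [pvStepA, hcmd, h1, h2, hc3], by simp [pvStepQ, hcmd, h1, h2, hc3]⟩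
  by_cases hc4 : op.head?.getD "" = "FRONT"
  · exact ⟨"EMPTY", by simp [pvStepA, hcmd, h1, h2, hc3, hc4],
      by simp [pvStepQ, hcmd, h1, h2, hc3, hc4]⟩
  by_cases hc5 : op.head?.getD "" = "REAR"
  · exact ⟨"EMPTY", by simp [pvStepA, hcmd, h1, h2, hc3, hc4, hc5],
      by simp [pvStepQ, hcmd, h1, h2, hc3, hc4, hc5]⟩
  by_cases hc6 : op.head?.getD "" = "ISEMPTY"
  · exact ⟨"true", by simp [pvStepA, hcmd, h1, h2, hc3, hc4, hc5, hc6],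
      by simp [pvStepQ, hcmd, h1, h2, hc3, hc4, hc5, hc6]⟩
  by_cases hc7 : op.head?.getD "" = "ISFULL"
  · exact ⟨if (0 : Int) = k then "true" else "false",
      by simp [pvStepA, hcmd, h1, h2, hc3, hc4, hc5, hc6, hc7],
      by simp [pvStepQ, hcmd, h1, h2, hc3, hc4, hc5, hc6, hc7]⟩
  by_cases hc8 : op.head?.getD "" = "SIZE"
  · exact ⟨PySem.Int.toStr 0, by simp [pvStepA, hcmd, h1, h2, hc3, hc4, hc5, hc6, hc7, hc8],
      by simp [pvStepQ, hcmd, h1, h2, hc3, hc4, hc5, hc6, hc7, hc8]⟩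
  · exact ⟨"NONE", by simp [pvStepA, hcmd, h1, h2, hc3, hc4, hc5, hc6, hc7, hc8],
      by simp [pvStepQ, hcmd, h1, h2, hc3, hc4, hc5, hc6, hc7, hc8]⟩

-- simulation between B's two-stack step and the abstract queue step: the live contents
-- front.reverse ++ back evolve by pvStepQ and the appended output is identical.
lemma pv_popHead_spec (front back : List Int) (h : front.reverse ++ back ≠ []) :
    ∃ x f' b', pvPopHead front back = some (x, f', b') ∧
      front.reverse ++ back = x :: (f'.reverse ++ b') := by
  rcases front.eq_nil_or_concat with rfl | ⟨fd, x, rfl⟩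
  · cases back with
    | nil => simp at h
    | cons b0 bt =>
      exact ⟨b0, bt.reverse, [],
        by simp [pvPopHead, List.reverse_cons, PySem.List.pop?_last], by simp⟩
  · exact ⟨x, fd, back, by simp [pvPopHead, PySem.List.pop?_last], by simp⟩

lemma pv_stepQB (k : Int) (front back : List Int) (res : List String) (op : List String)
    (hne : op ≠ []) (hovr : op.head?.getD "" = "ENQ_OVR" → 0 < k) :
    ∃ f' b' out,
      pvStepB k (front, back, res) op = (f', b', res ++ [out]) ∧
      pvStepQ k (front.reverse ++ back, res) op = (f'.reverse ++ b', res ++ [out]) := by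
  have hcmd : (PySem.List.pyGet? op 0).getD "" = op.head?.getD "" := by
    cases op with
    | nil => exact absurd rfl hne
    | cons a l => simp
  by_cases hc1 : op.head?.getD "" = "ENQ"
  · by_cases hfull : (front.length : Int) + (back.length : Int) = k
    · exact ⟨front, back, "false", by simp [pvStepB, hcmd, hc1, hfull],
        by simp [pvStepQ, hcmd, hc1, hfull]⟩
    · exact ⟨front, back ++ [((PySem.List.pyGet? op 1).bind PySem.Int.ofStr?).getD 0], "true",
        by simp [pvStepB, hcmd, hc1, hfull],
        by simp [pvStepQ, hcmd, hc1, hfull]⟩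
  by_cases hc2 : op.head?.getD "" = "ENQ_OVR"
  · have hk : 0 < k := hovr hc2
    by_cases hfull : (front.length : Int) + (back.length : Int) = k
    · have hqne : front.reverse ++ back ≠ [] := by
        intro h
        rw [List.append_eq_nil_iff, List.reverse_eq_nil_iff] at h
        obtain ⟨rfl, rfl⟩ := h
        simp at hfull
        omega
      obtain ⟨x, f', b', hpop, hq⟩ := pv_popHead_spec front back hqne
      refine ⟨f', b' ++ [((PySem.List.pyGet? op 1).bind PySem.Int.ofStr?).getD 0],
        PySem.Int.toStr x, by simp [pvStepB, hcmd, hc1, hc2, hfull, hpop], ?_⟩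
      have hql : (f'.length : Int) + (b'.length : Int) + 1 = k := by
        have hlq := congrArg List.length hq
        simp at hlq
        omega
      rw [hq]
      simp [pvStepQ, hcmd, hc1, hc2, hql, PySem.List.pop?_zero_cons]
    · exact ⟨front, back ++ [((PySem.List.pyGet? op 1).bind PySem.Int.ofStr?).getD 0], "NONE",
        by simp [pvStepB, hcmd, hc1, hc2, hfull],
        by simp [pvStepQ, hcmd, hc1, hc2, hfull]⟩
  by_cases hc3 : op.head?.getD "" = "DEQ"
  · by_cases hqe : front.reverse ++ back = []
    · rw [List.append_eq_nil_iff, List.reverse_eq_nil_iff] at hqe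
      obtain ⟨rfl, rfl⟩ := hqe
      exact ⟨[], [], "EMPTY", by simp [pvStepB, hcmd, hc1, hc2, hc3],
        by simp [pvStepQ, hcmd, hc1, hc2, hc3]⟩
    · obtain ⟨x, f', b', hpop, hq⟩ := pv_popHead_spec front back hqe
      have hs : ¬((front.length : Int) + (back.length : Int) = 0) := by
        intro h
        have h1 : front.length = 0 ∧ back.length = 0 := by omega
        exact hqe (by simp [List.length_eq_zero_iff.1 h1.1, List.length_eq_zero_iff.1 h1.2])
      refine ⟨f', b', PySem.Int.toStr x,
        by simp [pvStepB, hcmd, hc1, hc2, hc3, hs, hpop], ?_⟩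
      rw [hq]
      simp [pvStepQ, hcmd, hc1, hc2, hc3, PySem.List.pop?_zero_cons]
  by_cases hc4 : op.head?.getD "" = "FRONT"
  · by_cases hqe : front.reverse ++ back = []
    · rw [List.append_eq_nil_iff, List.reverse_eq_nil_iff] at hqe
      obtain ⟨rfl, rfl⟩ := hqe
      exact ⟨[], [], "EMPTY", by simp [pvStepB, hcmd, hc1, hc2, hc3, hc4],
        by simp [pvStepQ, hcmd, hc1, hc2, hc3, hc4]⟩
    · have hs : ¬((front.length : Int) + (back.length : Int) = 0) := by
        intro h
        have h1 : front.length = 0 ∧ back.length = 0 := by omega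
        exact hqe (by simp [List.length_eq_zero_iff.1 h1.1, List.length_eq_zero_iff.1 h1.2])
      rcases front.eq_nil_or_concat with rfl | ⟨fd, x, rfl⟩
      · cases back with
        | nil => simp at hqe
        | cons b0 bt =>
          exact ⟨[], b0 :: bt, PySem.Int.toStr b0,
            by simp [pvStepB, hcmd, hc1, hc2, hc3, hc4, hs]; intro h; exact absurd h (by omega),
            by simp [pvStepQ, hcmd, hc1, hc2, hc3, hc4]⟩
      · exact ⟨fd ++ [x], back, PySem.Int.toStr x,
          by simp [pvStepB, hcmd, hc1, hc2, hc3, hc4, hs, PySem.List.pyGet?_neg_one];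
             intro h; exact absurd h (by omega),
          by simp [pvStepQ, hcmd, hc1, hc2, hc3, hc4]⟩
  by_cases hc5 : op.head?.getD "" = "REAR"
  · by_cases hqe : front.reverse ++ back = []
    · rw [List.append_eq_nil_iff, List.reverse_eq_nil_iff] at hqe
      obtain ⟨rfl, rfl⟩ := hqe
      exact ⟨[], [], "EMPTY", by simp [pvStepB, hcmd, hc1, hc2, hc3, hc4, hc5],
        by simp [pvStepQ, hcmd, hc1, hc2, hc3, hc4, hc5]⟩
    · have hs : ¬((front.length : Int) + (back.length : Int) = 0) := by
        intro h
        have h1 : front.length = 0 ∧ back.length = 0 := by omega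
        exact hqe (by simp [List.length_eq_zero_iff.1 h1.1, List.length_eq_zero_iff.1 h1.2])
      rcases back.eq_nil_or_concat with rfl | ⟨bd, x, rfl⟩
      · cases front with
        | nil => simp at hqe
        | cons f0 ft =>
          refine ⟨f0 :: ft, [], PySem.Int.toStr f0,
            by simp [pvStepB, hcmd, hc1, hc2, hc3, hc4, hc5, hs]; intro h; exact absurd h (by omega), ?_⟩
          have hql : (f0 :: ft).reverse ++ ([] : List Int) ≠ [] := hqe
          simp [pvStepQ, hcmd, hc1, hc2, hc3, hc4, hc5, PySem.List.pyGet?_neg_one]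
      · refine ⟨front, bd ++ [x], PySem.Int.toStr x,
          by simp [pvStepB, hcmd, hc1, hc2, hc3, hc4, hc5, hs, PySem.List.pyGet?_neg_one];
             intro h; exact absurd h (by omega), ?_⟩
        have hassoc : front.reverse ++ (bd ++ [x]) = (front.reverse ++ bd) ++ [x] :=
          (List.append_assoc _ _ _).symm
        rw [hassoc]
        simp [pvStepQ, hcmd, hc1, hc2, hc3, hc4, hc5, PySem.List.pyGet?_neg_one]
  by_cases hc6 : op.head?.getD "" = "ISEMPTY"
  · by_cases hqe : front.reverse ++ back = []
    · rw [List.append_eq_nil_iff, List.reverse_eq_nil_iff] at hqe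
      obtain ⟨rfl, rfl⟩ := hqe
      exact ⟨[], [], "true", by simp [pvStepB, hcmd, hc1, hc2, hc3, hc4, hc5, hc6],
        by simp [pvStepQ, hcmd, hc1, hc2, hc3, hc4, hc5, hc6]⟩
    · have hs : ¬((front.length : Int) + (back.length : Int) = 0) := by
        intro h
        have h1 : front.length = 0 ∧ back.length = 0 := by omega
        exact hqe (by simp [List.length_eq_zero_iff.1 h1.1, List.length_eq_zero_iff.1 h1.2])
      exact ⟨front, back, "false",
        by simp [pvStepB, hcmd, hc1, hc2, hc3, hc4, hc5, hc6, hs],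
        by simp [pvStepQ, hcmd, hc1, hc2, hc3, hc4, hc5, hc6, hqe]⟩
  by_cases hc7 : op.head?.getD "" = "ISFULL"
  · by_cases hfull : (front.length : Int) + (back.length : Int) = k
    · exact ⟨front, back, "true", by simp [pvStepB, hcmd, hc1, hc2, hc3, hc4, hc5, hc6, hc7, hfull],
        by simp [pvStepQ, hcmd, hc1, hc2, hc3, hc4, hc5, hc6, hc7, hfull]⟩
    · exact ⟨front, back, "false", by simp [pvStepB, hcmd, hc1, hc2, hc3, hc4, hc5, hc6, hc7, hfull],
        by simp [pvStepQ, hcmd, hc1, hc2, hc3, hc4, hc5, hc6, hc7, hfull]⟩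
  by_cases hc8 : op.head?.getD "" = "SIZE"
  · exact ⟨front, back, PySem.Int.toStr ((front.length : Int) + (back.length : Int)),
      by simp [pvStepB, hcmd, hc1, hc2, hc3, hc4, hc5, hc6, hc7, hc8],
      by simp [pvStepQ, hcmd, hc1, hc2, hc3, hc4, hc5, hc6, hc7, hc8]⟩
  · exact ⟨front, back, "NONE",
      by simp [pvStepB, hcmd, hc1, hc2, hc3, hc4, hc5, hc6, hc7, hc8],
      by simp [pvStepQ, hcmd, hc1, hc2, hc3, hc4, hc5, hc6, hc7, hc8]⟩

lemma pv_fold_QB (k : Int) :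
    ∀ (ops : List (List String)) (front back : List Int) (res : List String),
      (∀ op ∈ ops, op ≠ [] ∧ (op.head?.getD "" = "ENQ_OVR" → 0 < k)) →
      (ops.foldl (pvStepQ k) (front.reverse ++ back, res)).2 =
      (ops.foldl (pvStepB k) (front, back, res)).2.2 := by
  intro ops
  induction ops with
  | nil => intro _ _ _ _; rfl
  | cons op rest ih =>
    intro front back res hpre
    obtain ⟨f', b', out, hB, hQ⟩ :=
      pv_stepQB k front back res op (hpre op (by simp)).1 (hpre op (by simp)).2
    simp only [List.foldl_cons, hB, hQ]
    exact ih f' b' (res ++ [out]) (fun o ho => hpre o (by simp [ho]))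

lemma pv_fold_sim (k : Int) (hk : 0 ≤ k) :
    ∀ (ops : List (List String)) (buffer : List Int) (head tail count : Int)
      (q : List Int) (res : List String),
      (∀ op ∈ ops, PreOp_process_operations k op) → pvInv k buffer head tail count q →
      (ops.foldl (pvStepA k) (buffer, head, tail, count, res)).2.2.2.2 =
      (ops.foldl (pvStepQ k) (q, res)).2 := by
  intro ops
  induction ops with
  | nil => intro _ _ _ _ _ _ _ _; rfl
  | cons op rest ih =>
    intro buffer head tail count q res hpre hinv
    obtain ⟨b', h', t', c', q', out, hA, hQ, hinv'⟩ :=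
      pv_step_sim k hk buffer head tail count q res op (hpre op (by simp)) hinv
    simp only [List.foldl_cons, hA, hQ]
    exact ih b' h' t' c' q' (res ++ [out]) (fun o ho => hpre o (by simp [ho])) hinv'

lemma pv_fold_query (k : Int) : ∀ (ops : List (List String)) (buffer : List Int)
    (head tail : Int) (res : List String),
    (∀ op ∈ ops, op ≠ [] ∧ op.head?.getD "" ≠ "ENQ" ∧ op.head?.getD "" ≠ "ENQ_OVR") →
    (ops.foldl (pvStepA k) (buffer, head, tail, 0, res)).2.2.2.2 =
    (ops.foldl (pvStepQ k) ([], res)).2 := by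
  intro ops
  induction ops with
  | nil => intro _ _ _ _ _; rfl
  | cons op rest ih =>
    intro buffer head tail res hpre
    obtain ⟨hne, h1, h2⟩ := hpre op (by simp)
    obtain ⟨out, hA, hQ⟩ := pv_step_query k buffer head tail res op hne h1 h2
    simp only [List.foldl_cons, hA, hQ]
    exact ih buffer head tail (res ++ [out]) (fun o ho => hpre o (by simp [ho]))

-- ===== VERDICT (by name: the statement is the Claim_ definition above) =====
theorem process_operations_spec : Claim_equal_process_operations := by
  intro k operations _ hpre
  obtain ⟨hops, hdisj⟩ := hpre
  show process_operations k operations = process_operations_alt k operations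
  unfold process_operations process_operations_alt
  have hQB : (operations.foldl (pvStepQ k) ([], [])).2 =
      (operations.foldl (pvStepB k) ([], [], [])).2.2 := by
    have := pv_fold_QB k operations [] [] []
      (fun op ho => ⟨(hops op ho).1, fun h => ((hops op ho).2.2 h).1⟩)
    simpa using this
  rw [← hQB]
  rcases hdisj with hk | hq
  · exact pv_fold_sim k hk operations (List.replicate k.toNat 0) 0 0 0 [] [] hops
      (by refine ⟨by simp, le_refl _, le_refl _, by omega, by simp, by simp, by simp, ?_⟩
          intro i hi; simp at hi)
  · exact pv_fold_query k operations (List.replicate k.toNat 0) 0 0 []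
      (fun op ho => ⟨(hops op ho).1, (hq op ho).1, (hq op ho).2⟩)
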